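-- pv_equiv track=rewrite | github.com/michaelkimm/Algorithm-problem-solving-thought-process-re-record | Python/Programmers/VisitedLength.py | solution
-- ===== SOURCE A (Python) =====
-- def solution(dirs):
--     dir_dict = {'U':0, 'D':1, 'L':2, 'R':3}
--     # 상하좌우
--     dx = [0, 0, -1, 1]
--     dy = [1, -1, 0, 0]
--     passed = set()
--     answer = 0
--     x, y = 0, 0
--     for d in dirs:
--         dir_idx = dir_dict[d]
--         nx = x + dx[dir_idx]
--         ny = y + dy[dir_idx]
--         if not (-5 <= nx <= 5 and -5 <= ny <= 5):
--             continue
--         if (not (x, y, dx[dir_idx], dy[dir_idx]) in passed) and (not (nx, ny, -dx[dir_idx], -dy[dir_idx]) in passed):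
--             passed.add((x, y, dx[dir_idx], dy[dir_idx]))
--             answer += 1
--         x, y = nx, ny
--     return answer
-- ===== SOURCE B (Python) =====
-- def solution(dirs):
--     delta = {'U': (0, 1), 'D': (0, -1), 'L': (-1, 0), 'R': (1, 0)}
--     # stage 1: build the list of visited grid points (bounded walk)
--     path = [(0, 0)]
--     for d in dirs:
--         x, y = path[-1]
--         dx, dy = delta[d]
--         nx, ny = x + dx, y + dy
--         if -5 <= nx <= 5 and -5 <= ny <= 5:
--             path.append((nx, ny))
--     # stage 2: count distinct undirected edges between consecutive points
--     return len({(min(p, q), max(p, q)) for p, q in zip(path, path[1:])})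
-- ===== Notes on version B (the rewrite author's own statement) =====
-- stated objective: alternative
-- what changed: B is staged: it first materialises the list of visited grid points (the bounded walk), then counts the distinct undirected edges between consecutive points via a set comprehension over zipped pairs, instead of A's single pass that maintains a directed-edge set with a two-orientation membership test and a running counter.
import Mathlib
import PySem

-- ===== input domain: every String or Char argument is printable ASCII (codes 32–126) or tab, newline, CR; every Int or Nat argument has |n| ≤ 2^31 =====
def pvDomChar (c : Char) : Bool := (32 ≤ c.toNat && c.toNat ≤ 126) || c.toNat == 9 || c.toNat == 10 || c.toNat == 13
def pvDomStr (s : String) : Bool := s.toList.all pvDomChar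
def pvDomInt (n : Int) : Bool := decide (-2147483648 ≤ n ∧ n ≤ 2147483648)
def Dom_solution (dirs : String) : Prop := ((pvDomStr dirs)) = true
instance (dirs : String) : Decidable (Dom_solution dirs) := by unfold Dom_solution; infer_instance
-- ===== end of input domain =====

-- B is staged (objective: alternative): it first builds the list of visited grid points,
-- then counts the distinct undirected edges between consecutive points, instead of A's
-- single pass maintaining a directed-edge set with a two-orientation test and a counter.

-- ===== PORT A =====
-- state: (passed, answer, x, y)
abbrev StA := PySem.Set (Int × Int × Int × Int) × Int × Int × Int

def stepA (st : StA) (d : Char) : StA :=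
  -- dir_dict / dx / dy are the Python literals, inlined
  match PySem.Dict.get? (PySem.Dict.ofList [('U',0),('D',1),('L',2),('R',3)]) d with
  | none => st            -- Python raises KeyError here; excluded by Pre_solution
  | some i =>
    let (passed, answer, x, y) := st
    match PySem.List.pyGet? [0, 0, -1, 1] i, PySem.List.pyGet? [1, -1, 0, 0] i with
    | some ddx, some ddy =>
      let nx := x + ddx
      let ny := y + ddy
      if ¬(-5 ≤ nx ∧ nx ≤ 5 ∧ -5 ≤ ny ∧ ny ≤ 5) then st
      else if ¬((x, y, ddx, ddy) ∈ passed) ∧ ¬((nx, ny, -ddx, -ddy) ∈ passed) then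
        (PySem.Set.add passed (x, y, ddx, ddy), answer + 1, nx, ny)
      else (passed, answer, nx, ny)
    | _, _ => st          -- unreachable: i ∈ {0,1,2,3}

def solution (dirs : String) : Int :=
  (dirs.toList.foldl stepA (PySem.Set.empty, 0, 0, 0)).2.1

-- ===== PORT B =====
-- (min(p, q), max(p, q)) on pairs: Python tuples compare lexicographically
def canonEdge (p q : Int × Int) : (Int × Int) × (Int × Int) :=
  if p.1 < q.1 ∨ (p.1 = q.1 ∧ p.2 ≤ q.2) then (p, q) else (q, p)

-- stage 1: one step of building the visited-point path (path[-1] = getLast?)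
def stepP (path : List (Int × Int)) (d : Char) : List (Int × Int) :=
  match PySem.Dict.get? (PySem.Dict.ofList [('U',(0,1)),('D',(0,-1)),('L',(-1,0)),('R',(1,0))]) d with
  | none => path          -- Python raises KeyError here; excluded by Pre_solution
  | some (ddx, ddy) =>
    match path.getLast? with
    | none => path        -- unreachable: path starts nonempty and only grows
    | some (x, y) =>
      let nx := x + ddx
      let ny := y + ddy
      if -5 ≤ nx ∧ nx ≤ 5 ∧ -5 ≤ ny ∧ ny ≤ 5 then path ++ [(nx, ny)] else path

-- stage 2: canonical edges of the consecutive pairs (zip(path, path[1:]))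
def edgesOf (path : List (Int × Int)) : List ((Int × Int) × (Int × Int)) :=
  (path.zip (path.drop 1)).map (fun pq => canonEdge pq.1 pq.2)

def solution_alt (dirs : String) : Int :=
  PySem.Set.len (PySem.Set.ofList (edgesOf (dirs.toList.foldl stepP [(0, 0)])))

-- ===== PRECONDITION & SPEC =====
-- Pre_ excludes strings with a character outside 'UDLR', on which both Pythons raise KeyError.
def Pre_solution (dirs : String) : Prop :=
  (dirs.toList.all (fun c => c == 'U' || c == 'D' || c == 'L' || c == 'R')) = true
instance (dirs : String) : Decidable (Pre_solution dirs) := by unfold Pre_solution; infer_instance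

def pvWitness_solution : String := "UDLR"

def Spec_solution (dirs : String) (out : Int) : Prop := out = solution_alt dirs
instance (dirs : String) (out : Int) : Decidable (Spec_solution dirs out) := by unfold Spec_solution; infer_instance

-- ===== CLAIM (what is proved, stated in full; the proofs are below) =====
def Claim_equal_solution : Prop :=
  ∀ (dirs : String), Dom_solution dirs → Pre_solution dirs → Spec_solution dirs (solution dirs)

-- ===== LEMMAS AND PROOFS =====

-- invariant tying A's (passed, answer) to the canonical edge set pb
def InvAB (pa : PySem.Set (Int × Int × Int × Int)) (pb : PySem.Set ((Int × Int) × (Int × Int)))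
    (ans : Int) : Prop :=
  pb.Nodup ∧ ans = (pb.length : Int) ∧
  ∀ a b u v : Int, ((a, b, u, v) ∈ pa ∨ (a + u, b + v, -u, -v) ∈ pa) ↔
    canonEdge (a, b) (a + u, b + v) ∈ pb

lemma canonEdge_eq_iff (a b u v c d s t : Int) :
    canonEdge (a, b) (a + u, b + v) = canonEdge (c, d) (c + s, d + t) ↔
    ((a = c ∧ b = d ∧ u = s ∧ v = t) ∨ (a = c + s ∧ b = d + t ∧ u = -s ∧ v = -t)) := by
  unfold canonEdge
  split_ifs <;> simp_all [Prod.ext_iff] <;> omega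

lemma edgesOf_cons_cons (a b : Int × Int) (l : List (Int × Int)) :
    edgesOf (a :: b :: l) = canonEdge a b :: edgesOf (b :: l) := by
  simp [edgesOf]

lemma edgesOf_concat (path : List (Int × Int)) (p q : Int × Int)
    (h : path.getLast? = some p) :
    edgesOf (path ++ [q]) = edgesOf path ++ [canonEdge p q] := by
  induction path with
  | nil => simp at h
  | cons a t ih =>
    cases t with
    | nil =>
      simp at h
      subst h
      simp [edgesOf]
    | cons b t' =>
      have h' : (b :: t').getLast? = some p := by
        rwa [List.getLast?_cons_cons] at h
      have := ih h'
      simp only [List.cons_append, edgesOf_cons_cons]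
      rw [← List.cons_append, this]

lemma ofList_concat {α : Type} [BEq α] (l : List α) (e : α) :
    PySem.Set.ofList (l ++ [e]) = PySem.Set.add (PySem.Set.ofList l) e := by
  simp [PySem.Set.ofList_eq_foldl, List.foldl_append]

-- core of one loop iteration, for a fixed delta (ddx, ddy)
lemma core_pres (pa : PySem.Set (Int × Int × Int × Int))
    (pb : PySem.Set ((Int × Int) × (Int × Int))) (ans x y ddx ddy : Int)
    (hInv : InvAB pa pb ans) :
    let nx := x + ddx
    let ny := y + ddy
    let ra : StA :=
      if ¬(-5 ≤ nx ∧ nx ≤ 5 ∧ -5 ≤ ny ∧ ny ≤ 5) then (pa, ans, x, y)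
      else if ¬((x, y, ddx, ddy) ∈ pa) ∧ ¬((nx, ny, -ddx, -ddy) ∈ pa) then
        (PySem.Set.add pa (x, y, ddx, ddy), ans + 1, nx, ny)
      else (pa, ans, nx, ny)
    let pb' :=
      if -5 ≤ nx ∧ nx ≤ 5 ∧ -5 ≤ ny ∧ ny ≤ 5 then
        PySem.Set.add pb (canonEdge (x, y) (nx, ny))
      else pb
    InvAB ra.1 pb' ra.2.1 ∧ ra.2.2 = (if -5 ≤ nx ∧ nx ≤ 5 ∧ -5 ≤ ny ∧ ny ≤ 5 then (nx, ny) else (x, y)) := by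
  intro nx ny ra pb'
  obtain ⟨hnod, hans, hmem⟩ := hInv
  by_cases hb : (-5 ≤ nx ∧ nx ≤ 5 ∧ -5 ≤ ny ∧ ny ≤ 5)
  · simp only [ra, pb']
    rw [if_neg (not_not_intro hb), if_pos hb, if_pos hb]
    have hkey := hmem x y ddx ddy
    by_cases hnew : ¬((x, y, ddx, ddy) ∈ pa) ∧ ¬((nx, ny, -ddx, -ddy) ∈ pa)
    · have hce : canonEdge (x, y) (nx, ny) ∉ pb := by
        intro h; exact absurd (hkey.mpr h) (by tauto)
      rw [if_pos hnew]
      refine ⟨⟨PySem.Set.nodup_add _ _ hnod, ?_, ?_⟩, rfl⟩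
      · show ans + 1 = _
        rw [PySem.Set.add_of_not_mem hce]
        simp [hans]
      · intro a b u v
        show _ ∨ _ ↔ _
        rw [PySem.Set.mem_add, PySem.Set.mem_add, PySem.Set.mem_add]
        have h2 := hmem a b u v
        have hE : ((a, b, u, v) = ((x, y, ddx, ddy) : Int × Int × Int × Int) ∨
            ((a + u, b + v, -u, -v) : Int × Int × Int × Int) = (x, y, ddx, ddy)) ↔
            canonEdge (a, b) (a + u, b + v) = canonEdge (x, y) (nx, ny) := by
          show _ ↔ canonEdge (a, b) (a + u, b + v) = canonEdge (x, y) (x + ddx, y + ddy)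
          rw [canonEdge_eq_iff]
          simp only [Prod.ext_iff]
          omega
        tauto
    · have hce : canonEdge (x, y) (nx, ny) ∈ pb := hkey.mp (by tauto)
      rw [if_neg hnew, PySem.Set.add_of_mem hce]
      exact ⟨⟨hnod, hans, hmem⟩, rfl⟩
  · simp only [ra, pb']
    rw [if_pos hb, if_neg hb, if_neg hb]
    exact ⟨⟨hnod, hans, hmem⟩, rfl⟩

-- stepP, reduced under a known delta and last point
lemma stepP_delta (path : List (Int × Int)) (x y ddx ddy : Int) (c : Char)
    (hd : PySem.Dict.get? (PySem.Dict.ofList [('U',(0,1)),('D',(0,-1)),('L',(-1,0)),('R',(1,0))]) c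
      = some (ddx, ddy))
    (hlast : path.getLast? = some (x, y)) :
    stepP path c = if -5 ≤ x + ddx ∧ x + ddx ≤ 5 ∧ -5 ≤ y + ddy ∧ y + ddy ≤ 5
      then path ++ [(x + ddx, y + ddy)] else path := by
  unfold stepP
  rw [hd, hlast]

-- one full iteration, by cases on the (valid) character
lemma step_pres (pa : PySem.Set (Int × Int × Int × Int)) (path : List (Int × Int))
    (ans x y : Int) (c : Char)
    (hc : c = 'U' ∨ c = 'D' ∨ c = 'L' ∨ c = 'R')
    (hlast : path.getLast? = some (x, y))
    (hInv : InvAB pa (PySem.Set.ofList (edgesOf path)) ans) :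
    InvAB (stepA (pa, ans, x, y) c).1 (PySem.Set.ofList (edgesOf (stepP path c)))
        (stepA (pa, ans, x, y) c).2.1 ∧
      (stepP path c).getLast? = some (stepA (pa, ans, x, y) c).2.2 := by
  have main : ∀ ddx ddy : Int,
      InvAB (if ¬(-5 ≤ x + ddx ∧ x + ddx ≤ 5 ∧ -5 ≤ y + ddy ∧ y + ddy ≤ 5) then (pa, ans, x, y)
          else if ¬((x, y, ddx, ddy) ∈ pa) ∧ ¬((x + ddx, y + ddy, -ddx, -ddy) ∈ pa) then
            (PySem.Set.add pa (x, y, ddx, ddy), ans + 1, x + ddx, y + ddy)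
          else (pa, ans, x + ddx, y + ddy) : StA).1
        (PySem.Set.ofList (edgesOf
          (if -5 ≤ x + ddx ∧ x + ddx ≤ 5 ∧ -5 ≤ y + ddy ∧ y + ddy ≤ 5
            then path ++ [(x + ddx, y + ddy)] else path)))
        ((if ¬(-5 ≤ x + ddx ∧ x + ddx ≤ 5 ∧ -5 ≤ y + ddy ∧ y + ddy ≤ 5) then (pa, ans, x, y)
          else if ¬((x, y, ddx, ddy) ∈ pa) ∧ ¬((x + ddx, y + ddy, -ddx, -ddy) ∈ pa) then
            (PySem.Set.add pa (x, y, ddx, ddy), ans + 1, x + ddx, y + ddy)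
          else (pa, ans, x + ddx, y + ddy) : StA)).2.1 ∧
      (if -5 ≤ x + ddx ∧ x + ddx ≤ 5 ∧ -5 ≤ y + ddy ∧ y + ddy ≤ 5
          then path ++ [(x + ddx, y + ddy)] else path).getLast? =
        some ((if ¬(-5 ≤ x + ddx ∧ x + ddx ≤ 5 ∧ -5 ≤ y + ddy ∧ y + ddy ≤ 5) then (pa, ans, x, y)
          else if ¬((x, y, ddx, ddy) ∈ pa) ∧ ¬((x + ddx, y + ddy, -ddx, -ddy) ∈ pa) then
            (PySem.Set.add pa (x, y, ddx, ddy), ans + 1, x + ddx, y + ddy)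
          else (pa, ans, x + ddx, y + ddy) : StA)).2.2 := by
    intro ddx ddy
    obtain ⟨hcore, hpos⟩ := core_pres pa (PySem.Set.ofList (edgesOf path)) ans x y ddx ddy hInv
    by_cases hb : (-5 ≤ x + ddx ∧ x + ddx ≤ 5 ∧ -5 ≤ y + ddy ∧ y + ddy ≤ 5)
    · rw [if_pos hb] at hcore hpos
      rw [if_pos hb, edgesOf_concat path (x, y) (x + ddx, y + ddy) hlast, ofList_concat]
      exact ⟨hcore, by rw [List.getLast?_concat, hpos]⟩
    · rw [if_neg hb] at hcore hpos
      rw [if_neg hb]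
      exact ⟨hcore, by rw [hpos]; exact hlast⟩
  rcases hc with h | h | h | h <;> subst h
  · rw [stepP_delta path x y 0 1 'U' rfl hlast]; exact main 0 1
  · rw [stepP_delta path x y 0 (-1) 'D' rfl hlast]; exact main 0 (-1)
  · rw [stepP_delta path x y (-1) 0 'L' rfl hlast]; exact main (-1) 0
  · rw [stepP_delta path x y 1 0 'R' rfl hlast]; exact main 1 0

lemma loop_pres (l : List Char) (pa : PySem.Set (Int × Int × Int × Int))
    (path : List (Int × Int)) (ans x y : Int)
    (hok : ∀ c ∈ l, c = 'U' ∨ c = 'D' ∨ c = 'L' ∨ c = 'R')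
    (hlast : path.getLast? = some (x, y))
    (hInv : InvAB pa (PySem.Set.ofList (edgesOf path)) ans) :
    (l.foldl stepA (pa, ans, x, y)).2.1 =
      ((PySem.Set.ofList (edgesOf (l.foldl stepP path))).length : Int) := by
  induction l generalizing pa path ans x y with
  | nil => exact hInv.2.1
  | cons c l ih =>
    obtain ⟨hInv', hlast'⟩ := step_pres pa path ans x y c (hok c (List.mem_cons_self ..)) hlast hInv
    simp only [List.foldl_cons]
    rcases hxy : (stepA (pa, ans, x, y) c).2.2 with ⟨x', y'⟩
    have hA : stepA (pa, ans, x, y) c =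
        ((stepA (pa, ans, x, y) c).1, (stepA (pa, ans, x, y) c).2.1, x', y') := by
      rw [← hxy]
    rw [hA]
    exact ih _ _ _ x' y' (fun c hc => hok c (List.mem_cons_of_mem _ hc))
      (by rw [hlast', hxy]) hInv'

-- ===== VERDICT (by name: the statement is the Claim_ definition above) =====
theorem solution_spec : Claim_equal_solution := by
  intro dirs _ hpre
  unfold Spec_solution solution solution_alt PySem.Set.len
  refine loop_pres dirs.toList _ _ _ _ _ ?_ rfl
    ⟨List.nodup_nil, rfl, by simp [edgesOf, PySem.Set.empty]⟩
  unfold Pre_solution at hpre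
  rw [List.all_eq_true] at hpre
  intro c hc
  have := hpre c hc
  simp at this
  tauto
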